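-- pv_equiv track=rewrite | github.com/littlemiracler/UrbanUniversity | module2hard.py | find_password
-- ===== SOURCE A (Python) =====
-- def find_password(num):
--     pairs = []
--     for i in range(1, num):
--         for j in range(i + 1, num + 1):
--             if num % (i + j) == 0 and i != j:
--                 pairs.append((i, j))
--     password = ''.join(str(x) + str(y) for x, y in pairs)
--     return password
-- ===== SOURCE B (Python) =====
-- def find_password(num):
--     divs = [d for d in range(1, num + 1) if num % d == 0]
--     parts = []
--     for i in range(1, num):
--         for d in divs:
--             if d > 2 * i:
--                 parts.append(str(i) + str(d - i))
--     return ''.join(parts)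
-- ===== Notes on version B (the rewrite author's own statement) =====
-- stated objective: faster
-- what changed: B precomputes the divisors of num once and, for each outer index i, emits j = d - i for each sufficiently large divisor d, replacing A's inner scan over all candidate j.
import Mathlib
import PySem

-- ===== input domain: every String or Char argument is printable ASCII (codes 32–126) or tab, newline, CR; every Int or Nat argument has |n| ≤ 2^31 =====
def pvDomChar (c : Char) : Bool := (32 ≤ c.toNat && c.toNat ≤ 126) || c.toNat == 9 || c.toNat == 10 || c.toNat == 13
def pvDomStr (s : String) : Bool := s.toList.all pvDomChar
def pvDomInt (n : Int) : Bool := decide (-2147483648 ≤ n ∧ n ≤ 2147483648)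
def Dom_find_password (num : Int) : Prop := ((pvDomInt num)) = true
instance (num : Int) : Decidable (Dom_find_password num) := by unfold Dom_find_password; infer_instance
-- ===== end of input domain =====

-- B precomputes the divisor list of num once and, per outer index i, emits j = d - i for each
-- sufficiently large divisor d, removing A's inner scan over all candidate j (objective: faster).

-- ===== PORT A =====
def find_password (num : Int) : String :=
  let pairs : List (Int × Int) :=
    (PySem.List.pyRange 1 num).foldl (fun acc i =>
      (PySem.List.pyRange (i + 1) (num + 1)).foldl (fun acc2 j =>
        if (PySem.Int.mod num (i + j) == 0) && (i != j) then acc2 ++ [(i, j)] else acc2) acc) []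
  PySem.Str.join "" (pairs.map (fun p => PySem.Int.toStr p.1 ++ PySem.Int.toStr p.2))

-- ===== PORT B =====
def find_password_alt (num : Int) : String :=
  let divs : List Int := (PySem.List.pyRange 1 (num + 1)).filter (fun d => PySem.Int.mod num d == 0)
  let parts : List String :=
    (PySem.List.pyRange 1 num).foldl (fun acc i =>
      divs.foldl (fun acc2 d =>
        if d > 2 * i then acc2 ++ [PySem.Int.toStr i ++ PySem.Int.toStr (d - i)] else acc2) acc) []
  PySem.Str.join "" parts

-- ===== PRECONDITION & SPEC =====
def Spec_find_password (num : Int) (out : String) : Prop := out = find_password_alt num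
instance (num : Int) (out : String) : Decidable (Spec_find_password num out) := by unfold Spec_find_password; infer_instance

-- ===== CLAIM (what is proved, stated in full; the proofs are below) =====
def Claim_equal_find_password : Prop := ∀ (num : Int), Dom_find_password num → Spec_find_password num (find_password num)

-- ===== LEMMAS AND PROOFS =====

-- Per outer index i, A's list of accepted j equals B's accepted divisors shifted by i.
lemma inner_lists_eq (num i : Int) (h1 : 1 ≤ i) (h2 : i < num) :
    (PySem.List.pyRange (i + 1) (num + 1)).filter
        (fun j => (PySem.Int.mod num (i + j) == 0) && (i != j))
      = ((((PySem.List.pyRange 1 (num + 1)).filter (fun d => PySem.Int.mod num d == 0)).filter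
          (fun d => decide (d > 2 * i))).map (fun d => d - i)) := by
  have hnum : 2 ≤ num := by omega
  apply List.Perm.eq_of_pairwise (le := (· < ·))
  · intro a b _ _ hab hba; omega
  · exact (PySem.List.pairwise_lt_pyRange_one _ _).filter _
  · exact List.Pairwise.map (fun d => d - i)
      (fun a b (h : a < b) => show a - i < b - i by omega)
      (((PySem.List.pairwise_lt_pyRange_one 1 (num + 1)).filter _).filter _)
  · rw [List.perm_ext_iff_of_nodup ((PySem.List.nodup_pyRange_one _ _).filter _)
      ((((PySem.List.nodup_pyRange_one 1 (num + 1)).filter _).filter _).map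
        (fun a b h => by omega))]
    intro x
    simp only [List.mem_filter, List.mem_map, PySem.List.mem_pyRange_one, beq_iff_eq,
      Bool.and_eq_true, bne_iff_ne, ne_eq, decide_eq_true_eq, PySem.Int.mod_eq_zero_iff_dvd]
    constructor
    · rintro ⟨⟨hlo, hhi⟩, hdvd, hne⟩
      refine ⟨x + i, ⟨⟨⟨by omega, ?_⟩, by rwa [Int.add_comm]⟩, by omega⟩, by ring⟩
      have := Int.le_of_dvd (by omega) hdvd
      omega
    · rintro ⟨d, ⟨⟨⟨hd1, hd2⟩, hdvd⟩, hgt⟩, rfl⟩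
      refine ⟨⟨by omega, by omega⟩, ?_, by omega⟩
      have : i + (d - i) = d := by ring
      rw [this]; exact hdvd

-- ===== VERDICT (by name: the statement is the Claim_ definition above) =====
theorem find_password_spec : Claim_equal_find_password := by
  intro num _
  unfold Spec_find_password find_password find_password_alt
  simp only []
  congr 1
  rw [PySem.List.foldl_congr_mem (PySem.List.pyRange 1 num) _
        (fun acc i => acc ++ ((PySem.List.pyRange (i + 1) (num + 1)).filter
          (fun j => (PySem.Int.mod num (i + j) == 0) && (i != j))).map (fun j => (i, j))) []
        (fun acc i _ => PySem.List.foldl_append_if _ _ _ _),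
      PySem.List.foldl_append_eq_flatMap, List.nil_append, List.map_flatMap,
      PySem.List.foldl_congr_mem (PySem.List.pyRange 1 num) _
        (fun acc i => acc ++ (((PySem.List.pyRange 1 (num + 1)).filter
            (fun d => PySem.Int.mod num d == 0)).filter
          (fun d => decide (d > 2 * i))).map
          (fun d => PySem.Int.toStr i ++ PySem.Int.toStr (d - i))) []
        (fun acc i _ => PySem.List.foldl_append_ite _ _ _ _),
      PySem.List.foldl_append_eq_flatMap, List.nil_append]
  apply List.flatMap_congr
  intro i hi
  rw [List.map_map, inner_lists_eq num i (PySem.List.mem_pyRange_one.mp hi).1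
      (PySem.List.mem_pyRange_one.mp hi).2, List.map_map]
  rfl
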